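-- pv_equiv track=rewrite | github.com/RainVagel/RoboJudge | main.py | create_lemmas_counted_dict
-- ===== SOURCE A (Python) =====
-- def create_lemmas_counted_dict(data_lemmatised):
--     # Loome dict kujul: {lemma: {lõigu_indeks:palju_neid_lõigus, lõigu_indeks jne...} lemma: {....}}
--     counted_lemmas_dict = dict()
--     for key in data_lemmatised.keys():
--         for lemma in data_lemmatised[key]:
--             if lemma in counted_lemmas_dict.keys():
--                 # Kui selline lemma on counted_lemmas_dictis
--                 if key in counted_lemmas_dict[lemma]:
--                     counted_lemmas_dict[lemma][key] += 1
--                 else: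
--                     counted_lemmas_dict[lemma][key] = 1
--             else:
--                 # Kui sellist lemmat pole counted_lemmas_dictis
--                 counted_loik = dict()
--                 counted_loik[key] = 1
--                 counted_lemmas_dict[lemma] = counted_loik
--     return counted_lemmas_dict
-- ===== SOURCE B (Python) =====
-- def create_lemmas_counted_dict(data_lemmatised):
--     # Lemma-major transpose: enumerate the distinct lemmas in first-seen order,
--     # then build each lemma's row by scanning the segments and counting with list.count.
--     lemma_order = dict.fromkeys(lemma for lemmas in data_lemmatised.values()
--                                 for lemma in lemmas)
--     return {lemma: {key: lemmas.count(lemma)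
--                     for key, lemmas in data_lemmatised.items()
--                     if lemma in lemmas}
--             for lemma in lemma_order}
-- ===== Notes on version B (the rewrite author's own statement) =====
-- stated objective: alternative
-- what changed: B transposes the traversal: instead of A's segment-major pass that increments nested counters per occurrence, B first lists the distinct lemmas in first-seen order and then builds each lemma's row by scanning the segments and counting with list.count; Pre_ only excludes association lists with duplicate segment keys, which do not represent a Python dict.
import Mathlib
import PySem

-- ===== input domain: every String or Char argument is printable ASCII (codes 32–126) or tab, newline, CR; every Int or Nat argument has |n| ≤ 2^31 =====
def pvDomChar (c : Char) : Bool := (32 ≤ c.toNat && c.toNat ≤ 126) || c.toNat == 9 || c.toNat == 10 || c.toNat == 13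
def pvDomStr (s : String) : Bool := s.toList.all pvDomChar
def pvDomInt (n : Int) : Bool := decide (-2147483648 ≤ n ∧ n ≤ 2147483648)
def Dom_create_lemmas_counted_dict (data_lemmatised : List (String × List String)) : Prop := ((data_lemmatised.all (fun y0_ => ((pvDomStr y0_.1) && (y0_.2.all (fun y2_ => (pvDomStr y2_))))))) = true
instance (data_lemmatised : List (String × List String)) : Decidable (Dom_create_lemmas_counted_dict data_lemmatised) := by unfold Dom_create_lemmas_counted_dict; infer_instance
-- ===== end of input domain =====

-- B transposes the traversal: lemma-major (distinct lemmas in first-seen order, then per-lemma counting over segments with list.count) instead of A's per-occurrence segment-major increments (alternative algorithm, not faster); equivalence proved for inputs whose association list has no duplicate segment keys.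


-- ===== PORT A =====
-- one occurrence: if lemma in dict → bump/create inner[key]; else fresh inner {key: 1}
def pvStepA (key : String) (d : PySem.Dict String (PySem.Dict String Int)) (lem : String) :
    PySem.Dict String (PySem.Dict String Int) :=
  match d.get? lem with
  | some inner =>
      if inner.contains key then d.insert lem (inner.insert key (inner.getD key 0 + 1))
      else d.insert lem (inner.insert key 1)
  | none => d.insert lem ((PySem.Dict.empty).insert key 1)

def create_lemmas_counted_dict (data_lemmatised : List (String × List String)) :
    List (String × List (String × Int)) :=
  -- for key in data_lemmatised.keys(): for lemma in data_lemmatised[key]: …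
  (((data_lemmatised.map Prod.fst).foldl
      (fun d key => ((PySem.Dict.mk data_lemmatised).getD key []).foldl (pvStepA key) d)
      PySem.Dict.empty).items).map (fun p => (p.1, PySem.Dict.items p.2))

-- ===== PORT B =====
def create_lemmas_counted_dict_alt (data_lemmatised : List (String × List String)) :
    List (String × List (String × Int)) :=
  -- lemma_order = dict.fromkeys(lemma for lemmas in … for lemma in lemmas)
  -- {lemma: {key: lemmas.count(lemma) for key, lemmas in … if lemma in lemmas} for lemma in lemma_order}
  (PySem.List.dedup (data_lemmatised.flatMap Prod.snd)).map
    (fun lem => (lem,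
      (data_lemmatised.filter (fun kv => kv.2.contains lem)).map
        (fun kv => (kv.1, (kv.2.count lem : Int)))))

-- ===== PRECONDITION & SPEC =====
-- Pre_ excludes association lists with duplicate segment keys: those do not represent a
-- Python dict (the parameter's type), so A's behaviour on them is not defined by the source.
def Pre_create_lemmas_counted_dict (data_lemmatised : List (String × List String)) : Prop :=
  (data_lemmatised.map Prod.fst).Nodup
instance (data_lemmatised : List (String × List String)) : Decidable (Pre_create_lemmas_counted_dict data_lemmatised) := by unfold Pre_create_lemmas_counted_dict; infer_instance
def pvWitness_create_lemmas_counted_dict : (List (String × List String)) :=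
  [("s1", ["a", "b", "a"]), ("s2", ["b"])]
def Spec_create_lemmas_counted_dict (data_lemmatised : List (String × List String)) (out : List (String × List (String × Int))) : Prop := out = create_lemmas_counted_dict_alt data_lemmatised
instance (data_lemmatised : List (String × List String)) (out : List (String × List (String × Int))) : Decidable (Spec_create_lemmas_counted_dict data_lemmatised out) := by unfold Spec_create_lemmas_counted_dict; infer_instance

-- ===== CLAIM (what is proved, stated in full; the proofs are below) =====
def Claim_equal_create_lemmas_counted_dict : Prop := ∀ (data_lemmatised : List (String × List String)), Dom_create_lemmas_counted_dict data_lemmatised → Pre_create_lemmas_counted_dict data_lemmatised → Spec_create_lemmas_counted_dict data_lemmatised (create_lemmas_counted_dict data_lemmatised)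

-- ===== LEMMAS AND PROOFS =====

-- ---- generic association-list fact ----
theorem pvAssocEq {α : Type} (S : List (String × α)) (l : String) (v w : α)
    (hnd : (S.map Prod.fst).Nodup) (h1 : (l, v) ∈ S) (h2 : (l, w) ∈ S) : v = w := by
  induction S with
  | nil => cases h1
  | cons p S ih =>
      simp only [List.map_cons, List.nodup_cons] at hnd
      rcases List.mem_cons.mp h1 with rfl | h1' <;> rcases List.mem_cons.mp h2 with h2' | h2'
      · simpa using h2'.symm
      · exact absurd (List.mem_map_of_mem (f := Prod.fst) h2') hnd.1
      · cases h2'; exact absurd (List.mem_map_of_mem (f := Prod.fst) h1') hnd.1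
      · exact ih hnd.2 h1' h2'

-- ---- A-side: per-segment loop reduces to installing Counter items (pvStepB) ----
-- 'key is in no inner dict of d'
def pvFresh (key : String) (d : PySem.Dict String (PySem.Dict String Int)) : Prop :=
  ∀ l inner, d.get? l = some inner → inner.contains key = false

def pvStepB (key : String) (d : PySem.Dict String (PySem.Dict String Int)) (p : String × Int) :
    PySem.Dict String (PySem.Dict String Int) :=
  d.insert p.1 ((d.getD p.1 PySem.Dict.empty).insert key p.2)

def pvApp (key : String) (ps : List (String × Int)) (d : PySem.Dict String (PySem.Dict String Int)) :
    PySem.Dict String (PySem.Dict String Int) :=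
  ps.foldl (pvStepB key) d

theorem pvApp_nil (key d) : pvApp key [] d = d := rfl
theorem pvApp_cons (key p ps d) : pvApp key (p :: ps) d = pvApp key ps (pvStepB key d p) := rfl

theorem pvGet?_app_nmem (key : String) (ps : List (String × Int)) (d) (l : String)
    (h : l ∉ ps.map Prod.fst) : (pvApp key ps d).get? l = d.get? l := by
  induction ps generalizing d with
  | nil => rfl
  | cons p ps ih =>
      simp only [List.map_cons, List.mem_cons, not_or] at h
      rw [pvApp_cons, ih _ h.2, pvStepB, PySem.Dict.get?_insert_of_ne _ _ h.1]

theorem pvStepA_stepB_self (key l : String) (n : Int) (d) :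
    pvStepA key (pvStepB key d (l, n)) l = pvStepB key d (l, n + 1) := by
  simp [pvStepA, pvStepB, PySem.Dict.get?_insert_self, PySem.Dict.contains_insert_self,
    PySem.Dict.getD_insert_self, PySem.Dict.insert_insert_self]

theorem pvInsert_insert_comm {k l : String} {v w : PySem.Dict String Int}
    (d : PySem.Dict String (PySem.Dict String Int)) (hkl : k ≠ l) (hl : d.contains l = true) :
    (d.insert k v).insert l w = (d.insert l w).insert k v := by
  have hl' : (d.insert k v).contains l = true := by
    rw [PySem.Dict.contains_insert, hl, Bool.or_true]
  have hk' : (d.insert l w).contains k = d.contains k := by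
    rw [PySem.Dict.contains_insert]
    simp [hkl]
  apply PySem.Dict.ext
  cases hk : d.contains k with
  | true =>
      rw [PySem.Dict.items_insert_of_contains _ w hl',
        PySem.Dict.items_insert_of_contains _ v hk,
        PySem.Dict.items_insert_of_contains _ v (hk' ▸ hk),
        PySem.Dict.items_insert_of_contains _ w hl,
        List.map_map, List.map_map]
      apply List.map_congr_left
      intro p _
      by_cases h1 : p.1 = k <;> by_cases h2 : p.1 = l <;>
        simp [Function.comp, h1, h2, hkl, Ne.symm hkl]
  | false =>
      rw [PySem.Dict.items_insert_of_contains _ w hl',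
        PySem.Dict.items_insert_of_not_contains _ v hk,
        PySem.Dict.items_insert_of_not_contains _ v (hk' ▸ hk),
        PySem.Dict.items_insert_of_contains _ w hl,
        List.map_append]
      simp [hkl]

theorem pvStepA_stepB_comm (key l : String) (p : String × Int) (d)
    (hkl : p.1 ≠ l) (hl : d.contains l = true) :
    pvStepA key (pvStepB key d p) l = pvStepB key (pvStepA key d l) p := by
  obtain ⟨inner, hinner⟩ : ∃ inner, d.get? l = some inner := by
    cases hg : d.get? l with
    | none => rw [(PySem.Dict.get?_eq_none_iff_contains d l).mp hg] at hl; cases hl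
    | some i => exact ⟨i, rfl⟩
  have hget : (pvStepB key d p).get? l = some inner := by
    rw [pvStepB, PySem.Dict.get?_insert_of_ne _ _ (Ne.symm hkl), hinner]
  rw [pvStepA, hget, pvStepA, hinner]
  by_cases hc : inner.contains key = true <;>
    · simp only [hc, if_true, Bool.false_eq_true, if_false, pvStepB]
      rw [PySem.Dict.getD_insert_of_ne _ _ _ hkl]
      exact pvInsert_insert_comm d hkl hl

theorem pvContains_stepB (key : String) (p : String × Int) (d) (l : String) :
    (pvStepB key d p).contains l = (l == p.1 || d.contains l) := by
  simp [pvStepB, PySem.Dict.contains_insert]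

theorem pvStepA_app_comm (key l : String) (ps : List (String × Int)) (d)
    (h : l ∉ ps.map Prod.fst) (hl : d.contains l = true) :
    pvStepA key (pvApp key ps d) l = pvApp key ps (pvStepA key d l) := by
  induction ps generalizing d with
  | nil => rfl
  | cons p ps ih =>
      simp only [List.map_cons, List.mem_cons, not_or] at h
      rw [pvApp_cons, ih _ h.2 (by rw [pvContains_stepB, hl, Bool.or_true]),
        pvStepA_stepB_comm key l p d (fun e => h.1 e.symm) hl, pvApp_cons]

theorem pvGamma_mem (key l : String) (n : Int) (ps : List (String × Int)) (d)
    (hnd : (ps.map Prod.fst).Nodup) (hmem : (l, n) ∈ ps) :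
    pvStepA key (pvApp key ps d) l
      = pvApp key (ps.map (fun p => if p.1 == l then (l, n + 1) else p)) d := by
  induction ps generalizing d with
  | nil => cases hmem
  | cons p ps ih =>
      simp only [List.map_cons] at hnd
      rcases List.nodup_cons.mp hnd with ⟨hp, hnd'⟩
      by_cases he : p.1 = l
      · have hpn : p = (l, n) := by
          rcases List.mem_cons.mp hmem with h | h
          · exact h.symm
          · exact absurd (List.mem_map_of_mem (f := Prod.fst) h) (he ▸ hp)
        subst hpn
        have hmapid : ps.map (fun q => if q.1 == l then (l, n + 1) else q) = ps := by
          refine (List.map_congr_left fun q hq => ?_).trans (List.map_id ps)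
          have : q.1 ≠ l :=
            fun e => (he ▸ hp) (e ▸ List.mem_map_of_mem (f := Prod.fst) hq)
          simp [this]
        rw [List.map_cons, hmapid, pvApp_cons, pvApp_cons]
        simp only [BEq.rfl, if_true]
        rw [pvStepA_app_comm key l ps _ hp (by rw [pvContains_stepB]; simp),
          pvStepA_stepB_self]
      · have hmem' : (l, n) ∈ ps := by
          rcases List.mem_cons.mp hmem with h | h
          · exact absurd (congrArg Prod.fst h.symm) he
          · exact h
        rw [List.map_cons, pvApp_cons]
        have : (if p.1 == l then (l, n + 1) else p) = p := by simp [he]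
        rw [this, pvApp_cons]
        exact ih _ hnd' hmem'

theorem pvGamma (key l : String) (c : PySem.Dict String Int) (d)
    (hc : c.keys.Nodup) (hf : pvFresh key d) :
    pvStepA key (pvApp key c.items d) l
      = pvApp key (c.insert l (c.getD l 0 + 1)).items d := by
  cases hcon : c.contains l with
  | false =>
      rw [PySem.Dict.items_insert_of_not_contains _ _ hcon,
        PySem.Dict.getD_of_not_contains _ _ hcon]
      rw [show c.items ++ [(l, (0 : Int) + 1)] = c.items ++ [(l, (0 : Int) + 1)] from rfl]
      rw [show pvApp key (c.items ++ [(l, 0 + 1)]) d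
            = pvApp key [(l, 0 + 1)] (pvApp key c.items d) by
          simp [pvApp, List.foldl_append]]
      have hnm : l ∉ c.items.map Prod.fst := by
        intro h
        rw [show c.items.map Prod.fst = c.keys from rfl] at h
        rw [(PySem.Dict.contains_iff_mem_keys c l).mpr h] at hcon
        cases hcon
      have hD : (pvApp key c.items d).get? l = d.get? l := pvGet?_app_nmem key c.items d l hnm
      rw [pvApp_cons, pvApp_nil, pvStepA, pvStepB, hD]
      cases hg : d.get? l with
      | none =>
          simp [PySem.Dict.getD_eq_get?_getD, hD, hg]
      | some inner =>
          simp [hf l inner hg, PySem.Dict.getD_eq_get?_getD, hD, hg]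
  | true =>
      obtain ⟨n, hg⟩ : ∃ n, c.get? l = some n := by
        cases hg : c.get? l with
        | none => rw [(PySem.Dict.get?_eq_none_iff_contains c l).mp hg] at hcon; cases hcon
        | some m => exact ⟨m, rfl⟩
      have hgetD : c.getD l 0 = n := by rw [PySem.Dict.getD_eq_get?_getD, hg]; rfl
      rw [PySem.Dict.items_insert_of_contains _ _ hcon, hgetD]
      exact pvGamma_mem key l n c.items d hc (PySem.Dict.mem_items_of_get?_eq_some c hg)

theorem pvLseg (key : String) (lemmas : List String) (c : PySem.Dict String Int) (d)
    (hc : c.keys.Nodup) (hf : pvFresh key d) :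
    lemmas.foldl (pvStepA key) (pvApp key c.items d)
      = pvApp key (lemmas.foldl (fun c l => c.insert l (c.getD l 0 + 1)) c).items d := by
  induction lemmas generalizing c with
  | nil => rfl
  | cons l rest ih =>
      simp only [List.foldl_cons]
      rw [pvGamma key l c d hc hf, ih _ (PySem.Dict.nodup_keys_insert _ _ _ hc)]

-- ---- B-side characterisation: wrap a nested items list as a nested Dict ----
def pvWrap (S : List (String × List (String × Int))) : PySem.Dict String (PySem.Dict String Int) :=
  PySem.Dict.mk (S.map (fun q => (q.1, PySem.Dict.mk q.2)))

theorem pvWrap_items (S) : (pvWrap S).items = S.map (fun q => (q.1, PySem.Dict.mk q.2)) := rfl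

theorem pvWrap_keys (S) : (pvWrap S).keys = S.map Prod.fst := by
  show (S.map (fun q => (q.1, PySem.Dict.mk q.2))).map Prod.fst = S.map Prod.fst
  rw [List.map_map]; rfl

theorem pvWrap_contains (S) (l : String) :
    (pvWrap S).contains l = true ↔ l ∈ S.map Prod.fst := by
  rw [PySem.Dict.contains_iff_mem_keys, pvWrap_keys]

theorem pvWrap_not_contains (S) (l : String) (h : l ∉ S.map Prod.fst) :
    (pvWrap S).contains l = false := by
  cases hc : (pvWrap S).contains l with
  | false => rfl
  | true => exact absurd ((pvWrap_contains S l).mp hc) h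

theorem pvFresh_wrap (k : String) (S)
    (hf : ∀ q ∈ S, k ∉ q.2.map Prod.fst) : pvFresh k (pvWrap S) := by
  intro l inner h
  have hmem := PySem.Dict.mem_items_of_get?_eq_some _ h
  rw [pvWrap_items] at hmem
  rcases List.mem_map.mp hmem with ⟨q, hq, hqe⟩
  have hinner : inner = PySem.Dict.mk q.2 := (congrArg Prod.snd hqe).symm
  subst hinner
  cases hc : (PySem.Dict.mk q.2).contains k with
  | false => rfl
  | true =>
      have : k ∈ (PySem.Dict.mk q.2).keys := (PySem.Dict.contains_iff_mem_keys _ k).mp hc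
      exact absurd this (hf q hq)

theorem pvStepB_wrap (k lem : String) (n : Int) (S)
    (hnd : (S.map Prod.fst).Nodup)
    (hf : ∀ q ∈ S, q.1 = lem → k ∉ q.2.map Prod.fst) :
    pvStepB k (pvWrap S) (lem, n)
      = pvWrap (if lem ∈ S.map Prod.fst
                then S.map (fun q => if q.1 == lem then (q.1, q.2 ++ [(k, n)]) else q)
                else S ++ [(lem, [(k, n)])]) := by
  by_cases hmem : lem ∈ S.map Prod.fst
  · rcases List.mem_map.mp hmem with ⟨q0, hq0, hq0e⟩
    have hq0' : (lem, q0.2) ∈ S := by rw [← hq0e]; exact hq0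
    have hkeys : (pvWrap S).keys.Nodup := by rw [pvWrap_keys]; exact hnd
    have hgetD : (pvWrap S).getD lem PySem.Dict.empty = PySem.Dict.mk q0.2 := by
      apply PySem.Dict.getD_of_mem_items
      · rw [pvWrap_items]
        exact List.mem_map.mpr ⟨(lem, q0.2), hq0', rfl⟩
      · exact hkeys
    have hfk : (PySem.Dict.mk q0.2).contains k = false := by
      cases hc : (PySem.Dict.mk q0.2).contains k with
      | false => rfl
      | true =>
          exact absurd ((PySem.Dict.contains_iff_mem_keys _ k).mp hc)
            (hf (lem, q0.2) hq0' rfl)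
    have hinner : (PySem.Dict.mk q0.2).insert k n = PySem.Dict.mk (q0.2 ++ [(k, n)]) := by
      apply PySem.Dict.ext
      rw [PySem.Dict.items_insert_of_not_contains _ _ hfk]
    rw [pvStepB]
    simp only [hmem, if_true]
    rw [hgetD, hinner]
    apply PySem.Dict.ext
    rw [PySem.Dict.items_insert_of_contains _ _ ((pvWrap_contains S lem).mpr hmem),
      pvWrap_items, pvWrap_items, List.map_map, List.map_map]
    apply List.map_congr_left
    intro q hq
    by_cases he : q.1 = lem
    · have : q.2 = q0.2 := by
        apply pvAssocEq S lem _ _ hnd _ hq0'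
        rw [← he]; exact hq
      simp [Function.comp, he, this]
    · simp [Function.comp, he]
  · have hgetD : (pvWrap S).getD lem PySem.Dict.empty = PySem.Dict.empty := by
      rw [PySem.Dict.getD_eq_get?_getD,
        (PySem.Dict.get?_eq_none_iff_contains _ lem).mpr (pvWrap_not_contains S lem hmem)]
      rfl
    have hinner : (PySem.Dict.empty : PySem.Dict String Int).insert k n
        = PySem.Dict.mk [(k, n)] := by
      apply PySem.Dict.ext
      rw [PySem.Dict.items_insert_of_not_contains _ _ (PySem.Dict.contains_empty k)]; rfl
    rw [pvStepB]
    simp only [hmem, if_false]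
    rw [hgetD, hinner]
    apply PySem.Dict.ext
    rw [PySem.Dict.items_insert_of_not_contains _ _ (pvWrap_not_contains S lem hmem),
      pvWrap_items, pvWrap_items, List.map_append]
    rfl

theorem pvFoldShape (k : String) (c : String → Int) :
    ∀ (L : List String) (S), L.Nodup → (S.map Prod.fst).Nodup →
    (∀ q ∈ S, q.1 ∈ L → k ∉ q.2.map Prod.fst) →
    pvApp k (L.map (fun lem => (lem, c lem))) (pvWrap S)
      = pvWrap (S.map (fun q => if q.1 ∈ L then (q.1, q.2 ++ [(k, c q.1)]) else q)
          ++ (L.filter (fun lem => lem ∉ S.map Prod.fst)).map (fun lem => (lem, [(k, c lem)]))) := by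
  intro L
  induction L with
  | nil =>
      intro S _ _ _
      simp [pvApp]
  | cons lem L' ih =>
      intro S hL hS hf
      rcases List.nodup_cons.mp hL with ⟨hlemL', hL'⟩
      rw [List.map_cons, pvApp_cons,
        pvStepB_wrap k lem (c lem) S hS (fun q hq hq1 => hf q hq (by rw [hq1]; exact List.mem_cons_self))]
      by_cases hmem : lem ∈ S.map Prod.fst
      · simp only [hmem, if_true]
        have hSmap : S.map (fun q => if q.1 == lem then (q.1, q.2 ++ [(k, c lem)]) else q)
            = S.map (fun q => if q.1 == lem then (q.1, q.2 ++ [(k, c q.1)]) else q) :=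
          List.map_congr_left fun q _ => by by_cases h : q.1 = lem <;> simp [h]
        rw [hSmap]
        set S₁ := S.map (fun q => if q.1 == lem then (q.1, q.2 ++ [(k, c q.1)]) else q) with hS₁
        have hfst : ∀ q : String × List (String × Int),
            ((fun q => if q.1 == lem then (q.1, q.2 ++ [(k, c q.1)]) else q) q).1 = q.1 := by
          intro q; by_cases h : q.1 = lem <;> simp [h]
        have hkeys₁ : S₁.map Prod.fst = S.map Prod.fst := by
          rw [hS₁, List.map_map]
          exact List.map_congr_left fun q _ => hfst q
        rw [ih S₁ hL' (by rw [hkeys₁]; exact hS)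
          (by
            intro q1 hq1 hq1L
            rcases List.mem_map.mp hq1 with ⟨q, hq, hqe⟩
            by_cases h : q.1 = lem
            · exfalso
              have : q1.1 = lem := by rw [← hqe]; simp [h]
              exact hlemL' (this ▸ hq1L)
            · have : q1 = q := by rw [← hqe]; simp [h]
              exact this ▸ hf q hq (List.mem_cons_of_mem _ (this ▸ hq1L)))]
        congr 1
        rw [hkeys₁]
        congr 1
        · rw [hS₁, List.map_map]
          apply List.map_congr_left
          intro q hq
          by_cases h : q.1 = lem
          · have hnotL' : q.1 ∉ L' := h ▸ hlemL'
            simp [Function.comp, h, List.mem_cons, hlemL']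
          · by_cases h2 : q.1 ∈ L' <;>
              simp [Function.comp, h, h2, List.mem_cons]
        · have hdrop : (lem :: L').filter (fun x => decide (x ∉ S.map Prod.fst))
              = L'.filter (fun x => decide (x ∉ S.map Prod.fst)) := by
            simp [hmem]
          rw [hdrop]
      · simp only [hmem, if_false]
        have hnewkeys : (S ++ [(lem, [(k, c lem)])]).map Prod.fst
            = S.map Prod.fst ++ [lem] := by simp
        rw [ih (S ++ [(lem, [(k, c lem)])]) hL'
          (by
            rw [hnewkeys]
            simp only [List.nodup_append, List.nodup_singleton, true_and]
            refine ⟨hS, ?_⟩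
            intro a ha b hb
            simp only [List.mem_singleton] at hb
            exact fun e => hmem ((hb ▸ e) ▸ ha))
          (by
            intro q hq hqL
            rcases List.mem_append.mp hq with hq' | hq'
            · exact hf q hq' (List.mem_cons_of_mem _ hqL)
            · exfalso
              have : q = (lem, [(k, c lem)]) := by simpa using hq'
              exact hlemL' (by rw [this] at hqL; exact hqL))]
        congr 1
        rw [List.map_append]
        have hnew : ([(lem, [(k, c lem)])].map
            (fun q => if q.1 ∈ L' then (q.1, q.2 ++ [(k, c q.1)]) else q))
            = [(lem, [(k, c lem)])] := by simp [hlemL']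
        rw [hnew, List.append_assoc]
        congr 1
        · apply List.map_congr_left
          intro q hq
          have hqlem : q.1 ≠ lem := by
            intro e
            exact hmem (e ▸ List.mem_map_of_mem (f := Prod.fst) hq)
          by_cases h2 : q.1 ∈ L' <;> simp [h2, hqlem, List.mem_cons]
        · have hfilters : L'.filter (fun x => decide (x ∉ (S ++ [(lem, [(k, c lem)])]).map Prod.fst))
              = L'.filter (fun x => decide (x ∉ S.map Prod.fst)) := by
            apply List.filter_congr
            intro x hx
            have hxlem : x ≠ lem := fun e => hlemL' (e ▸ hx)
            simp [hnewkeys, hxlem]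
          rw [hfilters]
          have hconsfilter : (lem :: L').filter (fun x => decide (x ∉ S.map Prod.fst))
              = lem :: L'.filter (fun x => decide (x ∉ S.map Prod.fst)) := by
            simp [List.filter, hmem]
          rw [hconsfilter, List.map_cons, List.singleton_append]

-- ---- the closed form and its step ----
def pvInner (lem : String) (pre : List (String × List String)) : List (String × Int) :=
  (pre.filter (fun kv => kv.2.contains lem)).map (fun kv => (kv.1, (kv.2.count lem : Int)))

def pvSpec (pre : List (String × List String)) : List (String × List (String × Int)) :=
  (PySem.List.dedup (pre.flatMap Prod.snd)).map (fun lem => (lem, pvInner lem pre))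

theorem pvSpec_keys (pre) : (pvSpec pre).map Prod.fst = PySem.List.dedup (pre.flatMap Prod.snd) := by
  rw [pvSpec, List.map_map,
    show (Prod.fst ∘ fun lem => (lem, pvInner lem pre)) = id from rfl, List.map_id]

theorem pvSpec_append (k : String) (ls : List String) (pre) :
    pvSpec (pre ++ [(k, ls)])
      = (pvSpec pre).map (fun q => if q.1 ∈ PySem.Set.ofList ls
            then (q.1, q.2 ++ [(k, (ls.count q.1 : Int))]) else q)
        ++ ((PySem.Set.ofList ls).filter (fun lem => lem ∉ (pvSpec pre).map Prod.fst)).map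
            (fun lem => (lem, [(k, (ls.count lem : Int))])) := by
  unfold pvSpec
  rw [List.flatMap_append, show ([(k, ls)].flatMap Prod.snd) = ls by simp,
    PySem.List.dedup_eq_ofList, PySem.List.dedup_eq_ofList,
    PySem.Set.ofList_append, PySem.Set.update_eq_append_filter, List.map_append]
  congr 1
  · rw [List.map_map]
    apply List.map_congr_left
    intro lem _
    have hsplit : pvInner lem (pre ++ [(k, ls)])
        = pvInner lem pre ++ (if lem ∈ ls then [(k, (ls.count lem : Int))] else []) := by
      unfold pvInner
      by_cases hmem : lem ∈ ls <;>
        simp [List.filter_append, List.filter, hmem]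
    by_cases hmem : lem ∈ ls <;>
      simp [Function.comp, hsplit, PySem.Set.mem_ofList, hmem]
  · have hpred : (PySem.Set.ofList ls).filter
          (fun y => !(PySem.Set.contains (PySem.Set.ofList (pre.flatMap Prod.snd)) y))
        = (PySem.Set.ofList ls).filter
            (fun lem => decide (lem ∉ ((PySem.Set.ofList (pre.flatMap Prod.snd)).map
              (fun lem => (lem, pvInner lem pre))).map Prod.fst)) := by
      apply List.filter_congr
      intro x _
      rw [List.map_map, show (Prod.fst ∘ fun lem => (lem, pvInner lem pre)) = id from rfl,
        List.map_id]
      simp [PySem.Set.contains]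
    rw [hpred]
    apply List.map_congr_left
    intro lem hlem
    rcases List.mem_filter.mp hlem with ⟨hlem1, hlem2⟩
    have hlemls : lem ∈ ls := (PySem.Set.mem_ofList _ _).mp hlem1
    have hnotflat : lem ∉ pre.flatMap Prod.snd := by
      intro h
      rw [List.map_map, show (Prod.fst ∘ fun lem => (lem, pvInner lem pre)) = id from rfl,
        List.map_id] at hlem2
      simp only [decide_eq_true_eq] at hlem2
      exact hlem2 ((PySem.Set.mem_ofList _ _).mpr h)
    have hnil : pvInner lem pre = [] := by
      unfold pvInner
      rw [List.filter_eq_nil_iff.mpr, List.map_nil]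
      intro kv hkv hc
      exact hnotflat (List.mem_flatMap.mpr ⟨kv, hkv, by simpa using hc⟩)
    have hsplit : pvInner lem (pre ++ [(k, ls)]) = [(k, (ls.count lem : Int))] := by
      unfold pvInner
      rw [List.filter_append, List.map_append]
      have h1 : pre.filter (fun kv => kv.2.contains lem) = [] := by
        apply List.filter_eq_nil_iff.mpr
        intro kv hkv hc
        exact hnotflat (List.mem_flatMap.mpr ⟨kv, hkv, by simpa using hc⟩)
      rw [h1]
      simp [List.filter, hlemls]
    rw [hsplit]

theorem pvSeg (k : String) (ls : List String) (pre)
    (hk : k ∉ pre.map Prod.fst) :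
    ls.foldl (pvStepA k) (pvWrap (pvSpec pre)) = pvWrap (pvSpec (pre ++ [(k, ls)])) := by
  have hsf : ∀ q ∈ pvSpec pre, k ∉ q.2.map Prod.fst := by
    intro q hq hkmem
    rcases List.mem_map.mp hq with ⟨lem, _, rfl⟩
    rcases List.mem_map.mp hkmem with ⟨p, hp, hpe⟩
    rcases List.mem_map.mp hp with ⟨kv, hkv, rfl⟩
    exact hk (hpe ▸ List.mem_map_of_mem (f := Prod.fst) (List.mem_of_mem_filter hkv))
  have hfresh : pvFresh k (pvWrap (pvSpec pre)) := pvFresh_wrap k _ hsf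
  have hndkeys : ((pvSpec pre).map Prod.fst).Nodup := by
    rw [pvSpec_keys, PySem.List.dedup_eq_ofList]
    exact PySem.Set.nodup_ofList _
  have h0 := pvLseg k ls PySem.Dict.empty (pvWrap (pvSpec pre))
    PySem.Dict.nodup_keys_empty hfresh
  rw [show pvApp k (PySem.Dict.empty : PySem.Dict String Int).items (pvWrap (pvSpec pre))
      = pvWrap (pvSpec pre) from rfl] at h0
  rw [h0,
    show ls.foldl (fun c l => c.insert l (c.getD l 0 + 1)) PySem.Dict.empty
      = PySem.Dict.counter ls from rfl,
    PySem.Dict.items_counter,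
    pvFoldShape k (fun lem => (ls.count lem : Int)) (PySem.Set.ofList ls) (pvSpec pre)
      (PySem.Set.nodup_ofList ls) hndkeys (fun q hq _ => hsf q hq)]
  exact congrArg pvWrap (pvSpec_append k ls pre).symm

theorem pvMain : ∀ (rest pre : List (String × List String)),
    ((pre ++ rest).map Prod.fst).Nodup →
    rest.foldl (fun d kv => kv.2.foldl (pvStepA kv.1) d) (pvWrap (pvSpec pre))
      = pvWrap (pvSpec (pre ++ rest)) := by
  intro rest
  induction rest with
  | nil => intro pre _; rw [List.foldl_nil, List.append_nil]
  | cons kv rest ih =>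
      intro pre hnd
      have hk : kv.1 ∉ pre.map Prod.fst := by
        intro hmem
        rw [List.map_append, List.nodup_append] at hnd
        exact (hnd.2.2 _ hmem _ (List.mem_map_of_mem (f := Prod.fst) List.mem_cons_self)) rfl
      simp only [List.foldl_cons]
      rw [show kv.2.foldl (pvStepA kv.1) (pvWrap (pvSpec pre))
            = pvWrap (pvSpec (pre ++ [(kv.1, kv.2)])) from pvSeg kv.1 kv.2 pre hk]
      have h := ih (pre ++ [(kv.1, kv.2)])
        (by rwa [List.append_assoc, List.singleton_append])
      rwa [List.append_assoc, List.singleton_append] at h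

theorem pvLookup (dl : List (String × List String)) (kv : String × List String)
    (hnd : (dl.map Prod.fst).Nodup) (hmem : kv ∈ dl) :
    (PySem.Dict.mk dl).getD kv.1 [] = kv.2 := by
  exact PySem.Dict.getD_of_mem_items _ hmem hnd []

-- ===== VERDICT (by name: the statement is the Claim_ definition above) =====
theorem create_lemmas_counted_dict_spec : Claim_equal_create_lemmas_counted_dict := by
  intro dl _ hpre
  unfold Spec_create_lemmas_counted_dict create_lemmas_counted_dict
  rw [List.foldl_map]
  rw [PySem.List.foldl_congr_mem dl
    (fun d kv => ((PySem.Dict.mk dl).getD kv.1 []).foldl (pvStepA kv.1) d)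
    (fun d kv => kv.2.foldl (pvStepA kv.1) d) PySem.Dict.empty
    (fun acc kv hkv => by simp only [pvLookup dl kv hpre hkv])]
  have h := pvMain dl [] (by simpa using hpre)
  rw [show pvWrap (pvSpec []) = PySem.Dict.empty from rfl] at h
  rw [show ([] : List (String × List String)) ++ dl = dl from rfl] at h
  rw [h, pvWrap_items, List.map_map,
    show ((fun p : String × PySem.Dict String Int => (p.1, PySem.Dict.items p.2)) ∘
        (fun q : String × List (String × Int) => (q.1, PySem.Dict.mk q.2))) = id from rfl,
    List.map_id]
  rfl
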